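-- pv_equiv track=rewrite | github.com/career-prep/ucp-namer-latam-2026 | homework0/emmanuel_nwankwo/q0_ZeroSum.py | zero_sum_without_reuse
-- ===== SOURCE A (Python) =====
-- def zero_sum_without_reuse(arr):
--     counts = {}
--     pairs = 0
--     seen = set()
--     for num in arr:
--         counts[num] = counts.get(num, 0) + 1
--
--     for num, count in counts.items():
--         if num == 0:
--             pairs += count // 2
--             continue
--         if num not in seen:
--             opp = -num
--             if opp not in counts:
--                 continue
--             pairs += min(counts[num], counts[opp])
--             seen.add(num)
--             seen.add(opp)
--     return pairs
-- ===== SOURCE B (Python) =====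
-- def zero_sum_without_reuse(arr):
--     available = {}
--     pairs = 0
--     for num in arr:
--         if available.get(-num, 0) > 0:
--             pairs += 1
--             available[-num] -= 1
--         else:
--             available[num] = available.get(num, 0) + 1
--     return pairs
-- ===== Notes on version B (the rewrite author's own statement) =====
-- stated objective: simpler
-- what changed: Replaces the count-dict-plus-seen-set two-phase scan (count everything, then walk distinct keys taking min(count[v],count[-v]) with a seen set) by a single online greedy pass that matches each element against a pending opposite in one dict.
import Mathlib
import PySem

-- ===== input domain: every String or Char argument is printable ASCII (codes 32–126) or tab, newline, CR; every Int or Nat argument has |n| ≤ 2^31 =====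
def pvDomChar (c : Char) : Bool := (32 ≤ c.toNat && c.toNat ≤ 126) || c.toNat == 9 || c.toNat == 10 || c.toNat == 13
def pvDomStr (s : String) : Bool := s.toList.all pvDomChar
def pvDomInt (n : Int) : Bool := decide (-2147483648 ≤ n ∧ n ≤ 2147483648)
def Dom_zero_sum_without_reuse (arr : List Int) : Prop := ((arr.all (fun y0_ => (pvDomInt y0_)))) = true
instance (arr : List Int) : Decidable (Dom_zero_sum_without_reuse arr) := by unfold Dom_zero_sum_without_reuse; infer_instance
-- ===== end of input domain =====

-- B replaces A's two-phase scan (count dict, then walk distinct keys with a seen set) by a single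
-- online greedy pass matching each element against a pending opposite (objective: simpler).

-- ===== PORT A =====
def zero_sum_without_reuse (arr : List Int) : Int :=
  let counts : PySem.Dict Int Int :=
    arr.foldl (fun d num => d.insert num (d.getD num 0 + 1)) PySem.Dict.empty
  (counts.items.foldl
    (fun (st : Int × PySem.Set Int) nc =>
      if nc.1 = 0 then (st.1 + PySem.Int.floordiv nc.2 2, st.2)
      else if PySem.Set.contains st.2 nc.1 then st
      else if !(counts.contains (-nc.1)) then st
      else (st.1 + min (counts.getD nc.1 0) (counts.getD (-nc.1) 0),
            PySem.Set.add (PySem.Set.add st.2 nc.1) (-nc.1)))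
    (0, PySem.Set.empty)).1

-- ===== PORT B =====
def zero_sum_without_reuse_alt (arr : List Int) : Int :=
  (arr.foldl
    (fun (st : PySem.Dict Int Int × Int) num =>
      if st.1.getD (-num) 0 > 0 then
        (st.1.insert (-num) (st.1.getD (-num) 0 - 1), st.2 + 1)
      else
        (st.1.insert num (st.1.getD num 0 + 1), st.2))
    (PySem.Dict.empty, 0)).2

-- ===== PRECONDITION & SPEC =====
def Spec_zero_sum_without_reuse (arr : List Int) (out : Int) : Prop := out = zero_sum_without_reuse_alt arr
instance (arr : List Int) (out : Int) : Decidable (Spec_zero_sum_without_reuse arr out) := by unfold Spec_zero_sum_without_reuse; infer_instance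

-- ===== CLAIM (what is proved, stated in full; the proofs are below) =====
def Claim_equal_zero_sum_without_reuse : Prop := ∀ (arr : List Int), Dom_zero_sum_without_reuse arr → Spec_zero_sum_without_reuse arr (zero_sum_without_reuse arr)

-- ===== LEMMAS AND PROOFS =====

def pvG (p : List Int) (v : Int) : Nat :=
  if v = 0 then p.count 0 % 2 else p.count v - p.count (-v)
def pvF (l : List Int) : Finset Int := l.toFinset.filter (fun v => 0 < v)
def pvN (l : List Int) : Nat :=
  l.count 0 / 2 + ∑ v ∈ pvF l, min (l.count v) (l.count (-v))
lemma pv_count_snoc (p : List Int) (x w : Int) :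
    (p ++ [x]).count w = p.count w + (if x = w then 1 else 0) := by
  simp [List.count_append, List.count_singleton]

lemma pvN_superset (p : List Int) (S : Finset Int)
    (hS : ∀ v, 0 < v → v ∈ p → v ∈ S) (hpos : ∀ v ∈ S, 0 < v) :
    pvN p = p.count 0 / 2 + ∑ v ∈ S, min (p.count v) (p.count (-v)) := by
  unfold pvN
  congr 1
  apply Finset.sum_subset
  · intro v hv
    simp only [pvF, Finset.mem_filter, List.mem_toFinset, decide_eq_true_eq] at hv
    exact hS v hv.2 hv.1
  · intro v hv hnv
    have hvpos : 0 < v := hpos v hv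
    have : v ∉ p := by
      intro hmem
      exact hnv (by simp [pvF, hmem, hvpos])
    have : p.count v = 0 := List.count_eq_zero.2 this
    simp [this]

lemma pvN_step (p : List Int) (x : Int) :
    pvN (p ++ [x]) = pvN p + (if 0 < pvG p (-x) then 1 else 0) := by
  have hpos : ∀ v ∈ pvF (p ++ [x]), 0 < v := by
    intro v hv; simpa [pvF] using (Finset.mem_filter.1 hv).2
  have hsub : ∀ v, 0 < v → v ∈ p → v ∈ pvF (p ++ [x]) := by
    intro v hv hm; simp [pvF, hv, List.mem_append, hm]
  rw [pvN_superset p (pvF (p ++ [x])) hsub hpos]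
  unfold pvN
  rcases eq_or_ne x 0 with hx | hx
  · subst hx
    have hsame : ∀ v ∈ pvF (p ++ [(0:Int)]), min ((p ++ [(0:Int)]).count v) ((p ++ [(0:Int)]).count (-v))
        = min (p.count v) (p.count (-v)) := by
      intro v hv
      have hv0 : 0 < v := hpos v hv
      have h1 : (0:Int) ≠ v := by omega
      have h2 : (0:Int) ≠ -v := by omega
      simp [pv_count_snoc, h1, h2]
    rw [Finset.sum_congr rfl hsame]
    have hc : (p ++ [(0:Int)]).count 0 = p.count 0 + 1 := by simp [pv_count_snoc]
    rw [hc]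
    simp only [pvG, neg_zero, if_pos rfl]
    split_ifs <;> omega
  · -- x ≠ 0
    have hc0 : (p ++ [x]).count 0 = p.count 0 := by simp [pv_count_snoc, hx]
    have hδ : (if 0 < pvG p (-x) then 1 else 0) = (if p.count x < p.count (-x) then 1 else 0) := by
      have h1 : -x ≠ 0 := by omega
      simp only [pvG, if_neg h1, neg_neg]
      split_ifs <;> omega
    rw [hc0, hδ]
    rcases lt_or_gt_of_ne hx with hneg | hposx
    · -- x < 0
      have hxv : ∀ v ∈ pvF (p ++ [x]), v ≠ -x →
          min ((p ++ [x]).count v) ((p ++ [x]).count (-v)) = min (p.count v) (p.count (-v)) := by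
        intro v hv hva
        have hv0 : 0 < v := hpos v hv
        have h1 : x ≠ v := by omega
        have h2 : x ≠ -v := by omega
        simp [pv_count_snoc, h1, h2]
      by_cases hmem : -x ∈ p
      · have hmem' : -x ∈ pvF (p ++ [x]) := by
          simp [pvF, List.mem_append, hmem]; omega
        rw [← Finset.sum_erase_add _ _ hmem',
            ← Finset.sum_erase_add _ (fun v => min (p.count v) (p.count (-v))) hmem']
        have hsame' : ∀ v ∈ (pvF (p ++ [x])).erase (-x),
            min ((p ++ [x]).count v) ((p ++ [x]).count (-v)) = min (p.count v) (p.count (-v)) := by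
          intro v hv
          exact hxv v (Finset.mem_of_mem_erase hv) (Finset.ne_of_mem_erase hv)
        rw [Finset.sum_congr rfl hsame']
        have h2 : x ≠ -x := by omega
        have hterm : min ((p ++ [x]).count (-x)) ((p ++ [x]).count (- -x))
            = min (p.count (-x)) (p.count (- -x)) + (if p.count x < p.count (-x) then 1 else 0) := by
          simp only [neg_neg, pv_count_snoc, if_neg h2, if_pos rfl]
          split_ifs <;> omega
        rw [hterm]; omega
      · have hcx : p.count (-x) = 0 := List.count_eq_zero.2 hmem
        have hδ0 : (if p.count x < p.count (-x) then 1 else 0) = 0 := by simp [hcx]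
        rw [hδ0]
        have hsame' : ∀ v ∈ pvF (p ++ [x]),
            min ((p ++ [x]).count v) ((p ++ [x]).count (-v)) = min (p.count v) (p.count (-v)) := by
          intro v hv
          apply hxv v hv
          intro hva
          have hv0 : 0 < v := hpos v hv
          have hvm : v = x ∨ v ∈ p := by
            have := (Finset.mem_filter.1 hv).1
            simpa using this
          rcases hvm with h | h
          · omega
          · exact hmem (hva ▸ h)
        rw [Finset.sum_congr rfl hsame']
        omega
    · -- 0 < x
      have hmem' : x ∈ pvF (p ++ [x]) := by
        simp [pvF, List.mem_append, hposx]
      have hxv : ∀ v ∈ (pvF (p ++ [x])).erase x,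
          min ((p ++ [x]).count v) ((p ++ [x]).count (-v)) = min (p.count v) (p.count (-v)) := by
        intro v hv
        have hva := Finset.ne_of_mem_erase hv
        have hv0 : 0 < v := hpos v (Finset.mem_of_mem_erase hv)
        have h1 : x ≠ v := fun h => hva h.symm
        have h2 : x ≠ -v := by omega
        simp [pv_count_snoc, h1, h2]
      rw [← Finset.sum_erase_add _ _ hmem',
          ← Finset.sum_erase_add _ (fun v => min (p.count v) (p.count (-v))) hmem']
      rw [Finset.sum_congr rfl hxv]
      have h2 : x ≠ -x := by omega
      have hterm : min ((p ++ [x]).count x) ((p ++ [x]).count (-x))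
          = min (p.count x) (p.count (-x)) + (if p.count x < p.count (-x) then 1 else 0) := by
        simp only [pv_count_snoc, if_pos rfl, if_neg h2]
        split_ifs <;> omega
      rw [hterm]; omega

lemma pvG_step (p : List Int) (x v : Int) :
    pvG (p ++ [x]) v =
      if 0 < pvG p (-x) then (if v = -x then pvG p v - 1 else pvG p v)
      else (if v = x then pvG p v + 1 else pvG p v) := by
  simp only [pvG, pv_count_snoc, neg_neg]
  rcases eq_or_ne x 0 with hx | hx
  · subst hx
    rcases eq_or_ne v 0 with hv | hv
    · subst hv; simp only [neg_zero, if_pos rfl]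
      split_ifs <;> omega
    · have : -v ≠ 0 := by omega
      simp only [neg_zero, if_pos rfl, if_neg hv, if_neg this]
      have h1 : ¬ ((0:Int) = v) := fun h => hv h.symm
      have h2 : ¬ ((0:Int) = -v) := by omega
      simp only [if_neg h1, if_neg h2]
      split_ifs <;> omega
  · have hnx : -x ≠ 0 := by omega
    rcases eq_or_ne v 0 with hv | hv
    · subst hv
      have h1 : ¬ (x = (0:Int)) := hx
      have h2 : ¬ ((0:Int) = -x) := by omega
      have h3 : ¬ ((0:Int) = x) := fun h => hx h.symm
      simp only [if_pos rfl, if_neg hnx, if_neg h1, if_neg h2, if_neg h3]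
      split_ifs <;> omega
    · rcases eq_or_ne v x with hvx | hvx
      · subst hvx
        have h1 : ¬ (v = -v) := by omega
        have h2 : -v ≠ 0 := by omega
        simp only [if_neg hv, if_neg hnx, if_neg h2, if_pos rfl, if_neg h1, neg_neg]
        split_ifs <;> omega
      · rcases eq_or_ne v (-x) with hvn | hvn
        · subst hvn
          have h1 : x ≠ -x := by omega
          simp only [neg_neg, if_neg hv, if_neg hnx, if_neg h1]
          split_ifs <;> omega
        · have h1 : ¬ (x = v) := fun h => hvx h.symm
          have h2 : ¬ (x = -v) := by omega
          have h3 : -v ≠ 0 ∨ v ≠ 0 := Or.inr hv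
          simp only [if_neg hv, if_neg hnx, if_neg h1, if_neg h2, if_neg hvn, if_neg hvx]
          split_ifs <;> omega

lemma pv_b_loop (l : List Int) : ∀ (p : List Int) (d : PySem.Dict Int Int) (pairs : Int),
    (∀ v, d.getD v 0 = (pvG p v : Int)) → pairs = (pvN p : Int) →
    (l.foldl
      (fun (st : PySem.Dict Int Int × Int) num =>
        if st.1.getD (-num) 0 > 0 then
          (st.1.insert (-num) (st.1.getD (-num) 0 - 1), st.2 + 1)
        else
          (st.1.insert num (st.1.getD num 0 + 1), st.2))
      (d, pairs)).2 = (pvN (p ++ l) : Int) := by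
  induction l with
  | nil => intro p d pairs hd hp; simpa using hp
  | cons x l ih =>
    intro p d pairs hd hp
    rw [List.foldl_cons]
    have hassoc : p ++ x :: l = (p ++ [x]) ++ l := by simp
    rw [hassoc]
    by_cases hgt : 0 < pvG p (-x)
    · have hcond : (d.getD (-x) 0 > 0) = True := by
        rw [hd]; simp; exact_mod_cast hgt
      simp only [hcond, if_true]
      apply ih
      · intro v
        rw [PySem.Dict.getD_insert, pvG_step p x v, if_pos hgt]
        split_ifs with h
        · subst h; rw [hd]; push_cast [Nat.cast_sub (by omega : 1 ≤ pvG p (-x))]; ring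
        · exact hd v
      · rw [hp, pvN_step, if_pos hgt]; push_cast; ring
    · have hc : ¬ ((0:Int) < d.getD (-x) 0) := by rw [hd]; exact_mod_cast hgt
      rw [if_neg (by simpa using hc)]
      apply ih
      · intro v
        rw [PySem.Dict.getD_insert, pvG_step p x v, if_neg hgt]
        split_ifs with h
        · subst h; rw [hd]; push_cast; ring
        · exact hd v
      · rw [hp, pvN_step, if_neg hgt]; push_cast; ring

lemma pv_alt_eq (arr : List Int) : zero_sum_without_reuse_alt arr = (pvN arr : Int) := by
  unfold zero_sum_without_reuse_alt
  have := pv_b_loop arr [] PySem.Dict.empty 0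
    (by intro v; simp [PySem.Dict.getD_empty, pvG])
    (by simp [pvN, pvF])
  simpa using this
def pvA (arr q : List Int) : Nat :=
  (if (0:Int) ∈ q then arr.count 0 / 2 else 0) +
    ∑ v ∈ pvF arr, (if v ∈ q ∨ -v ∈ q then min (arr.count v) (arr.count (-v)) else 0)

-- helper: extending q by a key that changes nothing relevant
lemma pvA_snoc_zero (arr q : List Int) (h0 : (0:Int) ∉ q) :
    pvA arr (q ++ [0]) = pvA arr q + arr.count 0 / 2 := by
  unfold pvA
  have hmem : (0:Int) ∈ q ++ [0] := by simp
  rw [if_pos hmem, if_neg h0]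
  have hcong : ∀ v ∈ pvF arr,
      (if v ∈ q ++ [(0:Int)] ∨ -v ∈ q ++ [(0:Int)] then min (arr.count v) (arr.count (-v)) else 0)
      = (if v ∈ q ∨ -v ∈ q then min (arr.count v) (arr.count (-v)) else 0) := by
    intro v hv
    have hv0 : 0 < v := by simpa [pvF] using (Finset.mem_filter.1 hv).2
    have h1 : v ≠ 0 := by omega
    have h2 : -v ≠ 0 := by omega
    simp [List.mem_append, h1, h2]
  rw [Finset.sum_congr rfl hcong]
  omega

lemma pvA_snoc_skip (arr q : List Int) (k : Int) (hk0 : k ≠ 0)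
    (hcase : -k ∈ q ∨ -k ∉ arr) :
    pvA arr (q ++ [k]) = pvA arr q := by
  unfold pvA
  have h0 : ((0:Int) ∈ q ++ [k]) ↔ ((0:Int) ∈ q) := by
    simp only [List.mem_append, List.mem_singleton]
    constructor
    · rintro (h | h)
      · exact h
      · exact absurd h.symm hk0
    · exact Or.inl
  rw [if_congr h0 rfl rfl]
  congr 1
  apply Finset.sum_congr rfl
  intro v hv
  have hv0 : 0 < v := by simpa [pvF] using (Finset.mem_filter.1 hv).2
  have hva : v ∈ arr := by simpa [pvF] using (Finset.mem_filter.1 hv).1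
  by_cases hvk : v = k
  · subst hvk
    rcases hcase with hq | hna
    · have hc : (v ∈ q ∨ -v ∈ q) := Or.inr hq
      have hc' : (v ∈ q ++ [v] ∨ -v ∈ q ++ [v]) := Or.inl (by simp)
      rw [if_pos hc, if_pos hc']
    · have hcv : arr.count (-v) = 0 := List.count_eq_zero.2 hna
      simp [hcv]
  · by_cases hvnk : v = -k
    · subst hvnk
      rcases hcase with hq | hna
      · have hc : ((-k:Int) ∈ q ∨ -(-k) ∈ q) := Or.inl hq
        have hc' : ((-k:Int) ∈ q ++ [k] ∨ -(-k) ∈ q ++ [k]) := Or.inl (by simp [hq])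
        rw [if_pos hc, if_pos hc']
      · exact absurd hva hna
    · have h1 : (v ∈ q ++ [k] ∨ -v ∈ q ++ [k]) ↔ (v ∈ q ∨ -v ∈ q) := by
        have h2 : -v ≠ k := fun h => hvnk (by omega)
        simp [List.mem_append, hvk, h2]
      rw [if_congr h1 rfl rfl]

lemma pvA_snoc_pair (arr q : List Int) (k : Int) (hk0 : k ≠ 0)
    (hka : k ∈ arr) (hnka : -k ∈ arr) (hnew : ¬ (k ∈ q ∨ -k ∈ q)) :
    pvA arr (q ++ [k]) = pvA arr q + min (arr.count k) (arr.count (-k)) := by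
  unfold pvA
  have h0 : ((0:Int) ∈ q ++ [k]) ↔ ((0:Int) ∈ q) := by
    simp only [List.mem_append, List.mem_singleton]
    constructor
    · rintro (h | h)
      · exact h
      · exact absurd h.symm hk0
    · exact Or.inl
  rw [if_congr h0 rfl rfl]
  have hsame : ∀ (a : Int), a = k ∨ a = -k → 0 < a → ∀ v ∈ (pvF arr).erase a,
      (if v ∈ q ++ [k] ∨ -v ∈ q ++ [k] then min (arr.count v) (arr.count (-v)) else 0)
      = (if v ∈ q ∨ -v ∈ q then min (arr.count v) (arr.count (-v)) else 0) := by
    intro a hak hapos v hv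
    have hva := Finset.ne_of_mem_erase hv
    have hv0 : 0 < v := by
      simpa [pvF] using (Finset.mem_filter.1 (Finset.mem_of_mem_erase hv)).2
    have h1 : (v ∈ q ++ [k] ∨ -v ∈ q ++ [k]) ↔ (v ∈ q ∨ -v ∈ q) := by
      have h2 : v ≠ k := by rcases hak with h|h <;> omega
      have h3 : -v ≠ k := by rcases hak with h|h <;> omega
      simp [List.mem_append, h2, h3]
    rw [if_congr h1 rfl rfl]
  rcases lt_or_gt_of_ne hk0 with hneg | hposk
  · -- k < 0, a = -k
    have hmem : -k ∈ pvF arr := by simp [pvF, hnka]; omega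
    rw [← Finset.sum_erase_add _ _ hmem, ← Finset.sum_erase_add _
      (fun v => if v ∈ q ∨ -v ∈ q then min (arr.count v) (arr.count (-v)) else 0) hmem]
    rw [Finset.sum_congr rfl (hsame (-k) (Or.inr rfl) (by omega))]
    have hcT : ((-k:Int) ∈ q ++ [k] ∨ -(-k) ∈ q ++ [k]) := Or.inr (by simp [neg_neg])
    have hcF : ¬ ((-k:Int) ∈ q ∨ -(-k) ∈ q) := by
      rw [neg_neg]
      rintro (h | h)
      · exact hnew (Or.inr h)
      · exact hnew (Or.inl h)
    rw [if_pos hcT, if_neg hcF, neg_neg, Nat.min_comm]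
    omega
  · -- 0 < k, a = k
    have hmem : k ∈ pvF arr := by simp [pvF, hka]; omega
    rw [← Finset.sum_erase_add _ _ hmem, ← Finset.sum_erase_add _
      (fun v => if v ∈ q ∨ -v ∈ q then min (arr.count v) (arr.count (-v)) else 0) hmem]
    rw [Finset.sum_congr rfl (hsame k (Or.inl rfl) hposk)]
    have hcT : (k ∈ q ++ [k] ∨ -k ∈ q ++ [k]) := Or.inl (by simp)
    rw [if_pos hcT, if_neg hnew]
    omega
lemma pv_a_loop (arr : List Int) (r : List Int) : ∀ (q : List Int) (pairs : Int) (seen : PySem.Set Int),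
    (q ++ r).Nodup → (∀ v, v ∈ q ++ r → v ∈ arr) →
    (∀ v : Int, PySem.Set.contains seen v = true ↔ (v ≠ 0 ∧ v ∈ arr ∧ -v ∈ arr ∧ (v ∈ q ∨ -v ∈ q))) →
    pairs = (pvA arr q : Int) →
    ((r.map (fun k => (k, (arr.count k : Int)))).foldl
      (fun (st : Int × PySem.Set Int) nc =>
        if nc.1 = 0 then (st.1 + PySem.Int.floordiv nc.2 2, st.2)
        else if PySem.Set.contains st.2 nc.1 then st
        else if !((PySem.Dict.counter arr).contains (-nc.1)) then st
        else (st.1 + min ((PySem.Dict.counter arr).getD nc.1 0) ((PySem.Dict.counter arr).getD (-nc.1) 0),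
              PySem.Set.add (PySem.Set.add st.2 nc.1) (-nc.1)))
      (pairs, seen)).1 = (pvA arr (q ++ r) : Int) := by
  induction r with
  | nil => intro q pairs seen _ _ _ hp; simpa using hp
  | cons k r ih =>
    intro q pairs seen hnd hsub hseen hp
    have hka : k ∈ arr := hsub k (by simp)
    have hkq : k ∉ q := by
      rcases List.nodup_append.1 hnd with ⟨_, _, hdisj⟩
      intro hkq'
      exact hdisj k hkq' k (by simp) rfl
    have hassoc : q ++ k :: r = (q ++ [k]) ++ r := by simp
    rw [hassoc] at hnd hsub ⊢
    simp only [List.map_cons, List.foldl_cons]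
    by_cases hk0 : k = 0
    · subst hk0
      rw [if_pos rfl]
      apply ih (q ++ [(0:Int)]) _ seen hnd hsub
      · intro v
        rw [hseen v]
        constructor
        · rintro ⟨h1, h2, h3, h4⟩
          exact ⟨h1, h2, h3, h4.imp (fun h => List.mem_append.2 (Or.inl h))
            (fun h => List.mem_append.2 (Or.inl h))⟩
        · rintro ⟨h1, h2, h3, h4⟩
          refine ⟨h1, h2, h3, ?_⟩
          rcases h4 with h | h
          · rcases List.mem_append.1 h with h | h
            · exact Or.inl h
            · simp at h; exact absurd h h1
          · rcases List.mem_append.1 h with h | h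
            · exact Or.inr h
            · simp at h; exfalso; apply h1; omega
      · have h2 : PySem.Int.floordiv ((arr.count (0:Int) : Nat) : Int) 2
            = ((arr.count (0:Int) / 2 : Nat) : Int) := by
          exact_mod_cast PySem.Int.floordiv_natCast (arr.count (0:Int)) 2
        rw [hp, pvA_snoc_zero arr q hkq, h2]
        push_cast
        ring
    · rw [if_neg hk0]
      by_cases hsc : PySem.Set.contains seen k
      · -- already seen: -k ∈ q
        obtain ⟨_, _, h3, h4⟩ := (hseen k).1 hsc
        have hnkq : -k ∈ q := by
          rcases h4 with h | h
          · exact absurd h hkq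
          · exact h
        rw [if_pos hsc]
        apply ih (q ++ [k]) _ seen hnd hsub
        · intro v
          rw [hseen v]
          constructor
          · rintro ⟨h1, h2, h3, h4⟩
            exact ⟨h1, h2, h3, h4.imp (fun h => List.mem_append.2 (Or.inl h))
              (fun h => List.mem_append.2 (Or.inl h))⟩
          · rintro ⟨h1, h2, h3', h4⟩
            refine ⟨h1, h2, h3', ?_⟩
            rcases h4 with h | h
            · rcases List.mem_append.1 h with h | h
              · exact Or.inl h
              · simp at h; subst h; exact Or.inr hnkq
            · rcases List.mem_append.1 h with h | h
              · exact Or.inr h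
              · simp at h
                have hv : v = -k := by omega
                exact Or.inl (hv ▸ hnkq)
        · rw [hp, pvA_snoc_skip arr q k hk0 (Or.inl hnkq)]
      · rw [if_neg (by simpa using hsc)]
        by_cases hmm : -k ∈ arr
        · -- main pairing branch
          have hnew : ¬ (k ∈ q ∨ -k ∈ q) := by
            intro hor
            have hP := (hseen k).2 ⟨hk0, hka, hmm, hor⟩
            rw [hP] at hsc
            exact hsc rfl
          have hccb : (PySem.Dict.counter arr).contains (-k) = true := by
            rw [PySem.Dict.contains_counter]
            simpa using hmm
          rw [if_neg (by simp [hccb])]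
          rw [PySem.Dict.getD_counter, PySem.Dict.getD_counter]
          apply ih (q ++ [k]) _ _ hnd hsub
          · intro v
            rw [PySem.Set.contains_iff, PySem.Set.mem_add, PySem.Set.mem_add]
            constructor
            · rintro ((h | h) | h)
              · obtain ⟨h1, h2, h3, h4⟩ := (hseen v).1 ((PySem.Set.contains_iff seen v).2 h)
                exact ⟨h1, h2, h3, h4.imp (fun h => List.mem_append.2 (Or.inl h))
                  (fun h => List.mem_append.2 (Or.inl h))⟩
              · subst h
                exact ⟨hk0, hka, hmm, Or.inl (List.mem_append.2 (Or.inr (by simp)))⟩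
              · subst h
                refine ⟨by omega, hmm, by rw [neg_neg]; exact hka,
                  Or.inr (by rw [neg_neg]; exact List.mem_append.2 (Or.inr (by simp)))⟩
            · rintro ⟨h1, h2, h3, h4⟩
              by_cases hvk : v = k
              · exact Or.inl (Or.inr hvk)
              · by_cases hvnk : v = -k
                · exact Or.inr hvnk
                · refine Or.inl (Or.inl ?_)
                  refine (PySem.Set.contains_iff seen v).1 ((hseen v).2 ⟨h1, h2, h3, ?_⟩)
                  rcases h4 with h | h
                  · rcases List.mem_append.1 h with h | h
                    · exact Or.inl h
                    · simp at h; exact absurd h hvk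
                  · rcases List.mem_append.1 h with h | h
                    · exact Or.inr h
                    · simp at h; exfalso; apply hvnk; omega
          · rw [hp, pvA_snoc_pair arr q k hk0 hka hmm hnew]
            push_cast [Nat.cast_min]
            ring
        · -- opp absent: skip
          have hccb : (PySem.Dict.counter arr).contains (-k) = false := by
            rw [PySem.Dict.contains_counter]
            simpa using hmm
          rw [if_pos (by simp [hccb])]
          apply ih (q ++ [k]) _ seen hnd hsub
          · intro v
            rw [hseen v]
            constructor
            · rintro ⟨h1, h2, h3, h4⟩
              exact ⟨h1, h2, h3, h4.imp (fun h => List.mem_append.2 (Or.inl h))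
                (fun h => List.mem_append.2 (Or.inl h))⟩
            · rintro ⟨h1, h2, h3, h4⟩
              refine ⟨h1, h2, h3, ?_⟩
              rcases h4 with h | h
              · rcases List.mem_append.1 h with h | h
                · exact Or.inl h
                · simp at h; subst h; exact absurd h3 hmm
              · rcases List.mem_append.1 h with h | h
                · exact Or.inr h
                · simp at h
                  have hv : v = -k := by omega
                  rw [hv] at h2
                  exact absurd h2 hmm
          · rw [hp, pvA_snoc_skip arr q k hk0 (Or.inr hmm)]
lemma pvA_full (arr : List Int) : pvA arr (PySem.Set.ofList arr) = pvN arr := by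
  unfold pvA pvN
  by_cases h0 : (0:Int) ∈ arr
  · rw [if_pos ((PySem.Set.mem_ofList arr 0).2 h0)]
    congr 1
    apply Finset.sum_congr rfl
    intro v hv
    have hva : v ∈ arr := by simpa [pvF] using (Finset.mem_filter.1 hv).1
    rw [if_pos (Or.inl ((PySem.Set.mem_ofList arr v).2 hva))]
  · have hc : arr.count 0 = 0 := List.count_eq_zero.2 h0
    rw [if_neg (fun h => h0 ((PySem.Set.mem_ofList arr 0).1 h)), hc]
    congr 1
    apply Finset.sum_congr rfl
    intro v hv
    have hva : v ∈ arr := by simpa [pvF] using (Finset.mem_filter.1 hv).1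
    rw [if_pos (Or.inl ((PySem.Set.mem_ofList arr v).2 hva))]

lemma pv_a_eq (arr : List Int) : zero_sum_without_reuse arr = (pvN arr : Int) := by
  unfold zero_sum_without_reuse
  simp only [PySem.Dict.foldl_insert_getD_add_one_eq_counter, PySem.Dict.items_counter]
  have := pv_a_loop arr (PySem.Set.ofList arr) [] 0 PySem.Set.empty
    (by simpa using PySem.Set.nodup_ofList arr)
    (by intro v hv; exact (PySem.Set.mem_ofList arr v).1 (by simpa using hv))
    (by intro v; simp [PySem.Set.contains_iff, PySem.Set.empty])
    (by simp [pvA])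
  rw [show ([] : List Int) ++ PySem.Set.ofList arr = PySem.Set.ofList arr from rfl] at this
  rw [this, pvA_full]

-- ===== VERDICT (by name: the statement is the Claim_ definition above) =====
theorem zero_sum_without_reuse_spec : Claim_equal_zero_sum_without_reuse := by
  intro arr _
  unfold Spec_zero_sum_without_reuse
  rw [pv_a_eq, pv_alt_eq]
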